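-- pv_equiv track=rewrite | github.com/Samay3131/Handwritten-Greek-Character-Recognition | Codes/KNN.py | split_neighbours
-- ===== SOURCE A (Python) =====
-- def split_neighbours(pred):
--     y_pred = []
--     for i in range(len(pred)):
--         temp = []
--         temp = list(pred[i])
--         c = []
--         for i in temp:
--             c.append(temp.count(i))
--             index_c = c.index(max(c))
--         y_pred.append(temp[index_c])
--     return y_pred
-- ===== SOURCE B (Python) =====
-- def split_neighbours(pred):
--     def best(row):
--         head = row[0]
--         rest = [x for x in row if x != head]
--         cnt = len(row) - len(rest)
--         if not rest:
--             return head, cnt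
--         m, mc = best(rest)
--         if mc > cnt:
--             return m, mc
--         return head, cnt
--     return [best(row)[0] for row in pred]
-- ===== Notes on version B (the rewrite author's own statement) =====
-- stated objective: alternative
-- what changed: A builds, per row, a parallel list of repeated temp.count scans and re-finds c.index(max(c)) after each append; B uses a recursive successive-elimination: take the first value, remove all its occurrences in one partition pass (its count is the length drop), recurse on the remainder, and keep the earlier value on ties, so no count list, no dict and no index search exist.
import Mathlib
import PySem

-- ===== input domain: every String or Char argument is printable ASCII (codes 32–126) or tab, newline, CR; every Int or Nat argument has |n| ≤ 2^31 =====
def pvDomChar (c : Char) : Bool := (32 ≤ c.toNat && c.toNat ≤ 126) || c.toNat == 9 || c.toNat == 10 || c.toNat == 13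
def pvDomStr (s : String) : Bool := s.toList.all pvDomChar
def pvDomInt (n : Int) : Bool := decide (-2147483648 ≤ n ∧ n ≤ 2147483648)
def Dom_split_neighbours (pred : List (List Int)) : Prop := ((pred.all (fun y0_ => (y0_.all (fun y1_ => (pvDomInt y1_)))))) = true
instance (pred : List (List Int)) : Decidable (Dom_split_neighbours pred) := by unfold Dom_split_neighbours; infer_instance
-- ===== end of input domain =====

-- B replaces A's per-row count-list/index-scan machinery by a recursive successive-elimination:
-- peel off the first value (count = length drop of one partition pass), recurse on the rest,
-- earlier value wins ties; objective: alternative (no count list, dict or index search).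

-- ===== PORT A =====
-- inner loop body: c.append(temp.count(i)); index_c = c.index(max(c))  (c nonempty there, so the
-- .getD 0 totalizations on max?/index? are never hit); temp[index_c] is pyGetD with default 0,
-- only reached out of range when a row is empty (Python raises there; excluded by Pre_).
-- index_c is a function-level variable in Python, so it is threaded through the outer fold
-- (initial value 0 is arbitrary: Python's UnboundLocalError case is excluded by Pre_).
def split_neighbours (pred : List (List Int)) : List Int :=
  (pred.foldl
    (fun (st : List Int × Int) temp =>
      let inner := temp.foldl
        (fun (s : List Int × Int) i =>
          let c := s.1 ++ [((PySem.List.count temp i : Nat) : Int)]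
          let index_c := (((PySem.List.index? c ((PySem.List.max? c (fun y => y)).getD 0)).getD 0 : Nat) : Int)
          (c, index_c))
        ([], st.2)
      (st.1 ++ [PySem.List.pyGetD temp inner.2 0], inner.2))
    ([], 0)).1

-- ===== PORT B =====
-- best(row): head = row[0] (row[0] on an empty row raises in Python; that case is excluded by
-- Pre_, the [] branch here is a totalization); rest = [x for x in row if x != head];
-- cnt = len(row) - len(rest); recurse on rest, strict 'mc > cnt' keeps the earlier value on ties.
def pvBest : List Int → Int × Int
  | [] => (0, 0)
  | head :: t =>
    let rest := (head :: t).filter (fun x => x != head)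
    let cnt : Int := (((head :: t).length : Nat) : Int) - ((rest.length : Nat) : Int)
    if rest = [] then (head, cnt)
    else
      let r := pvBest rest
      if r.2 > cnt then r else (head, cnt)
termination_by row => row.length
decreasing_by
  simp
  have := List.length_filter_le (fun x => x != head) t
  omega

def split_neighbours_alt (pred : List (List Int)) : List Int :=
  pred.map (fun row => (pvBest row).1)

-- ===== PRECONDITION & SPEC =====
-- Pre_ excludes inputs containing an empty row: there Python A raises (UnboundLocalError on a first
-- empty row, IndexError otherwise) and Python B raises IndexError; A returns on every other input.
def Pre_split_neighbours (pred : List (List Int)) : Prop := ∀ r ∈ pred, r ≠ []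
instance (pred : List (List Int)) : Decidable (Pre_split_neighbours pred) := by unfold Pre_split_neighbours; infer_instance
def pvWitness_split_neighbours : List (List Int) := [[1, 2, 1], [3], [5, 5, 4, 4]]
def Spec_split_neighbours (pred : List (List Int)) (out : List Int) : Prop := out = split_neighbours_alt pred
instance (pred : List (List Int)) (out : List Int) : Decidable (Spec_split_neighbours pred out) := by unfold Spec_split_neighbours; infer_instance

-- ===== CLAIM (what is proved, stated in full; the proofs are below) =====
def Claim_equal_split_neighbours : Prop := ∀ (pred : List (List Int)), Dom_split_neighbours pred → Pre_split_neighbours pred → Spec_split_neighbours pred (split_neighbours pred)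

-- ===== LEMMAS AND PROOFS =====

-- the count key of a row
def pvCnt (t : List Int) : Int → Int := fun x => ((PySem.List.count t x : Nat) : Int)

-- A's per-row index computation on the finished count list
def pvIdx (c : List Int) : Int :=
  (((PySem.List.index? c ((PySem.List.max? c (fun y => y)).getD 0)).getD 0 : Nat) : Int)

-- the common per-row value: first element of the row's distinct values attaining the maximal count
def pvRowB (t : List Int) : Int :=
  (PySem.List.max? (PySem.Set.ofList t) (pvCnt t)).getD 0

theorem pv_innerA (t : List Int) (l : List Int) (acc : List Int) (ic0 : Int) :
    l.foldl
      (fun (s : List Int × Int) i =>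
        let c := s.1 ++ [((PySem.List.count t i : Nat) : Int)]
        let index_c := (((PySem.List.index? c ((PySem.List.max? c (fun y => y)).getD 0)).getD 0 : Nat) : Int)
        (c, index_c))
      (acc, ic0)
    = (acc ++ l.map (pvCnt t), if l = [] then ic0 else pvIdx (acc ++ l.map (pvCnt t))) := by
  induction l generalizing acc ic0 with
  | nil => simp
  | cons x l ih =>
    simp only [List.foldl_cons]
    rw [ih]
    cases l with
    | nil => simp [pvCnt, pvIdx]
    | cons y l' => simp [pvCnt, List.append_assoc]

theorem pv_idxOf_eq {t : List Int} {v : Int} {j : Nat} (hj : j < t.length)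
    (h1 : t[j] = v) (h2 : ∀ i (_ : i < j), t[i]'(by omega) ≠ v) : t.idxOf v = j := by
  induction t generalizing j with
  | nil => simp at hj
  | cons a t ih =>
    cases j with
    | zero => simp_all
    | succ j =>
      have ha : a ≠ v := by
        have := h2 0 (Nat.succ_pos j); simpa using this
      rw [List.idxOf_cons_ne _ (by simpa using ha)]
      have := ih (j := j) (by simpa using hj) (by simpa using h1)
        (fun i hi => by
          have := h2 (i + 1) (by omega); simpa using this)
      omega

theorem pv_ofList_pairwise_idxOf (t : List Int) :
    (PySem.Set.ofList t).Pairwise (fun a b => t.idxOf a < t.idxOf b) := by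
  induction t using List.reverseRecOn with
  | nil => simp [PySem.Set.ofList, PySem.Set.empty]
  | append_singleton t x ih =>
    have hof : PySem.Set.ofList (t ++ [x]) = PySem.Set.add (PySem.Set.ofList t) x := by
      simp [PySem.Set.ofList, List.foldl_append]
    rw [hof]
    by_cases hx : x ∈ PySem.Set.ofList t
    · have hc : (PySem.Set.ofList t).contains x = true := by
        simpa [List.contains_iff_mem] using hx
      rw [PySem.Set.add, if_pos hc]
      refine ih.imp_of_mem ?_
      intro a b ha hb hab
      have hat : a ∈ t := (PySem.Set.mem_ofList t a).mp ha
      have hbt : b ∈ t := (PySem.Set.mem_ofList t b).mp hb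
      rwa [List.idxOf_append_of_mem hat, List.idxOf_append_of_mem hbt]
    · have hc : ¬ (PySem.Set.ofList t).contains x = true := by
        simpa [List.contains_iff_mem] using hx
      rw [PySem.Set.add, if_neg hc]
      have hxt : x ∉ t := fun h => hx ((PySem.Set.mem_ofList t x).mpr h)
      rw [List.pairwise_append]
      refine ⟨ih.imp_of_mem ?_, by simp, ?_⟩
      · intro a b ha hb hab
        have hat : a ∈ t := (PySem.Set.mem_ofList t a).mp ha
        have hbt : b ∈ t := (PySem.Set.mem_ofList t b).mp hb
        rwa [List.idxOf_append_of_mem hat, List.idxOf_append_of_mem hbt]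
      · intro a ha b hb
        have hb' : b = x := by simpa using hb
        have hat : a ∈ t := (PySem.Set.mem_ofList t a).mp ha
        rw [hb', List.idxOf_append_of_mem hat]
        have h1 : t.idxOf a < t.length := List.idxOf_lt_length_of_mem hat
        have h2 : (t ++ [x]).idxOf x = t.length := by
          rw [List.idxOf_append, if_neg hxt]; simp
        omega

def pvStep (f : Int → Int) : Option Int → Int → Option Int :=
  fun acc x =>
    match acc with
    | none => some x
    | some m => if f m < f x then some x else some m

theorem pv_max?_eq_foldl (xs : List Int) (f : Int → Int) :
    PySem.List.max? xs f = xs.foldl (pvStep f) none := by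
  unfold PySem.List.max? pvStep
  congr 1
  funext acc x
  cases acc with
  | none => rfl
  | some m => by_cases h : f m < f x <;> simp [h]

theorem pv_foldl_max_of_le {f : Int → Int} (l : List Int) (m : Int)
    (h : ∀ y ∈ l, f y ≤ f m) :
    l.foldl (pvStep f) (some m) = some m := by
  induction l with
  | nil => rfl
  | cons y l ih =>
    have hy : f y ≤ f m := h y (by simp)
    simp only [List.foldl_cons, pvStep]
    rw [if_neg (by omega)]
    exact ih (fun z hz => h z (by simp [hz]))

theorem pv_max?_of_split {f : Int → Int} (s1 s2 : List Int) (v : Int)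
    (h1 : ∀ y ∈ s1, f y < f v) (h2 : ∀ y ∈ s1 ++ v :: s2, f y ≤ f v) :
    PySem.List.max? (s1 ++ v :: s2) f = some v := by
  rw [pv_max?_eq_foldl, List.foldl_append]
  have hv2 : ∀ y ∈ s2, f y ≤ f v := fun y hy => h2 y (by simp [hy])
  cases hfold : s1.foldl (pvStep f) none with
  | none =>
    simp only [List.foldl_cons, pvStep]
    exact pv_foldl_max_of_le s2 v hv2
  | some m =>
    have hm : m ∈ s1 := PySem.List.max?_mem (by rw [pv_max?_eq_foldl, hfold])
    have hlt : f m < f v := h1 m hm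
    simp only [List.foldl_cons, pvStep]
    rw [if_pos hlt]
    exact pv_foldl_max_of_le s2 v hv2

theorem pv_rowEq (t : List Int) (ht : t ≠ []) :
    PySem.List.pyGetD t (pvIdx (t.map (pvCnt t))) 0 = pvRowB t := by
  set f := pvCnt t with hf
  set cl := t.map f with hc
  have hcne : cl ≠ [] := by simpa [hc] using ht
  obtain ⟨M, hM⟩ : ∃ M, PySem.List.max? cl (fun y => y) = some M := by
    cases h : PySem.List.max? cl (fun y => y) with
    | none => exact absurd ((PySem.List.max?_eq_none_iff cl _).mp h) hcne
    | some M => exact ⟨M, rfl⟩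
  have hMmem : M ∈ cl := PySem.List.max?_mem hM
  have hMmax : ∀ y ∈ cl, y ≤ M := fun y hy => PySem.List.max?_isMax hM y hy
  obtain ⟨j, hj⟩ : ∃ j, PySem.List.index? cl M = some j := by
    have := (PySem.List.index?_isSome_iff cl M).mpr hMmem
    cases h : PySem.List.index? cl M with
    | none => rw [h] at this; simp at this
    | some j => exact ⟨j, rfl⟩
  obtain ⟨hjlen, hcj, hjfirst⟩ := PySem.List.getElem_of_index?_eq_some hj
  have hjt : j < t.length := by simpa [hc] using hjlen
  set v := t[j]'hjt with hv
  have hfv : f v = M := by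
    have : cl[j]'hjlen = f (t[j]'hjt) := by simp [hc]
    rw [← hcj, this]
  have hfirst_lt : ∀ i (hi : i < j), f (t[i]'(by omega)) < M := by
    intro i hi
    have hlen : i < cl.length := by omega
    have hne : cl[i]'hlen ≠ M := hjfirst i hi
    have hle : cl[i]'hlen ≤ M := hMmax _ (List.getElem_mem hlen)
    have : cl[i]'hlen = f (t[i]'(by omega)) := by simp [hc]
    omega
  have hLHS : PySem.List.pyGetD t (pvIdx cl) 0 = v := by
    have : pvIdx cl = ((j : Nat) : Int) := by
      have hj' := hj
      rw [PySem.List.index?_eq_idxOf?] at hj'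
      simp [pvIdx, hM, hj']
    rw [this, PySem.List.pyGetD_natCast, List.getD_eq_getElem _ _ hjt]
  rw [hLHS]
  have hidx : t.idxOf v = j := by
    refine pv_idxOf_eq hjt rfl ?_
    intro i hi hvv
    have := hfirst_lt i hi
    rw [hvv, hfv] at this
    omega
  have hvmem : v ∈ PySem.Set.ofList t := (PySem.Set.mem_ofList t v).mpr (List.getElem_mem hjt)
  obtain ⟨s1, s2, hs⟩ := List.append_of_mem hvmem
  have hpair := pv_ofList_pairwise_idxOf t
  rw [hs, List.pairwise_append] at hpair
  have hbefore : ∀ y ∈ s1, f y < f v := by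
    intro y hy
    have hyv : t.idxOf y < t.idxOf v := hpair.2.2 y hy v (by simp)
    have hyt : y ∈ t := by
      have : y ∈ PySem.Set.ofList t := by rw [hs]; simp [hy]
      exact (PySem.Set.mem_ofList t y).mp this
    have hylt : t.idxOf y < t.length := List.idxOf_lt_length_of_mem hyt
    have hget : t[t.idxOf y]'hylt = y := List.getElem_idxOf hylt
    have := hfirst_lt (t.idxOf y) (by omega)
    rw [hget] at this
    omega
  have hall : ∀ y ∈ s1 ++ v :: s2, f y ≤ f v := by
    intro y hy
    have hyt : y ∈ t := by
      have : y ∈ PySem.Set.ofList t := by rw [hs]; exact hy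
      exact (PySem.Set.mem_ofList t y).mp this
    have : f y ∈ cl := by rw [hc]; exact List.mem_map_of_mem hyt
    have := hMmax _ this
    omega
  have : PySem.List.max? (PySem.Set.ofList t) f = some v := by
    rw [hs]; exact pv_max?_of_split s1 s2 v hbefore hall
  simp [pvRowB, ← hf, this]

theorem pv_outer (l : List (List Int)) (acc : List Int) (ic : Int)
    (h : ∀ r ∈ l, r ≠ []) :
    (l.foldl
      (fun (st : List Int × Int) temp =>
        let inner := temp.foldl
          (fun (s : List Int × Int) i =>
            let c := s.1 ++ [((PySem.List.count temp i : Nat) : Int)]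
            let index_c := (((PySem.List.index? c ((PySem.List.max? c (fun y => y)).getD 0)).getD 0 : Nat) : Int)
            (c, index_c))
          ([], st.2)
        (st.1 ++ [PySem.List.pyGetD temp inner.2 0], inner.2))
      (acc, ic)).1 = acc ++ l.map pvRowB := by
  induction l generalizing acc ic with
  | nil => simp
  | cons t l ih =>
    have ht : t ≠ [] := h t (by simp)
    simp only [List.foldl_cons]
    rw [pv_innerA t t [] ic]
    simp only [if_neg ht]
    rw [ih _ _ (fun r hr => h r (by simp [hr]))]
    rw [List.nil_append, pv_rowEq t ht]
    simp

-- ===== B-side lemmas: pvBest computes the first-max of the distinct values =====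

-- foldl of Set.add over any seen-list s appends exactly the new first occurrences
theorem pv_foldl_add_eq (l : List Int) : ∀ s : List Int,
    l.foldl PySem.Set.add s = s ++ (PySem.Set.ofList l).filter (fun x => !s.contains x) := by
  induction l with
  | nil => intro s; simp [PySem.Set.ofList, PySem.Set.empty]
  | cons y l ih =>
    intro s
    have hofl : PySem.Set.ofList (y :: l)
        = [y] ++ (PySem.Set.ofList l).filter (fun x => !([y].contains x)) := by
      show (y :: l).foldl PySem.Set.add PySem.Set.empty = _
      rw [List.foldl_cons]
      have h0 : PySem.Set.add PySem.Set.empty y = [y] := by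
        simp [PySem.Set.add, PySem.Set.empty]
      rw [h0, ih]
    by_cases hy : y ∈ s
    · have hadd : PySem.Set.add s y = s := by simp [PySem.Set.add, hy]
      rw [List.foldl_cons, hadd, ih, hofl, List.filter_append, List.filter_filter]
      have h1 : ([y] : List Int).filter (fun x => !s.contains x) = [] := by
        simp [hy]
      rw [h1, List.nil_append]
      congr 1
      refine (List.filter_congr ?_)
      intro x _
      by_cases hxy : x = y
      · subst hxy; simp [hy]
      · simp [hxy]
    · have hadd : PySem.Set.add s y = s ++ [y] := by simp [PySem.Set.add, hy]
      rw [List.foldl_cons, hadd, ih, hofl, List.filter_append, List.filter_filter,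
        List.append_assoc]
      have h1 : ([y] : List Int).filter (fun x => !s.contains x) = [y] := by
        simp [hy]
      rw [h1]
      congr 2
      refine (List.filter_congr ?_)
      intro x _
      by_cases hxy : x = y
      · subst hxy; simp [hy]
      · simp [hxy]

theorem pv_ofList_cons (y : Int) (l : List Int) :
    PySem.Set.ofList (y :: l) = y :: (PySem.Set.ofList l).filter (fun x => x != y) := by
  show (y :: l).foldl PySem.Set.add PySem.Set.empty = _
  rw [List.foldl_cons]
  have h0 : PySem.Set.add PySem.Set.empty y = [y] := by
    simp [PySem.Set.add, PySem.Set.empty]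
  rw [h0, pv_foldl_add_eq]
  show y :: _ = y :: _
  congr 1
  refine (List.filter_congr ?_)
  intro x _
  by_cases hxy : x = y
  · subst hxy; simp
  · simp [bne_iff_ne, hxy]

theorem pv_ofList_filter (p : Int → Bool) (l : List Int) :
    PySem.Set.ofList (l.filter p) = (PySem.Set.ofList l).filter p := by
  induction l with
  | nil => simp [PySem.Set.ofList, PySem.Set.empty]
  | cons y l ih =>
    rw [pv_ofList_cons, List.filter_cons]
    by_cases hy : p y
    · rw [if_pos hy, pv_ofList_cons, ih, List.filter_cons, if_pos hy,
        List.filter_filter, List.filter_filter]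
      have hpq : List.filter (fun a => a != y && p a) (PySem.Set.ofList l)
          = List.filter (fun a => p a && a != y) (PySem.Set.ofList l) :=
        List.filter_congr fun x _ => by simp [Bool.and_comm]
      rw [hpq]
    · rw [if_neg hy, ih, List.filter_cons, if_neg hy, List.filter_filter]
      refine List.filter_congr fun x _ => ?_
      by_cases hxy : x = y
      · subst hxy; simp [hy]
      · simp [hxy]

-- count of an element unequal to the filtered-out head is unchanged
theorem pv_count_filter_ne (h : Int) (l : List Int) (x : Int) (hx : x ≠ h) :
    (l.filter (fun z => z != h)).count x = l.count x := by
  rw [List.count_filter]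
  simp [hx]

-- the specification of pvBest on a nonempty row
theorem pv_best_spec : ∀ n (row : List Int), row.length ≤ n → row ≠ [] →
    ∃ s1 s2, PySem.Set.ofList row = s1 ++ (pvBest row).1 :: s2 ∧
      (pvBest row).2 = pvCnt row (pvBest row).1 ∧
      (∀ y ∈ s1, pvCnt row y < (pvBest row).2) ∧
      (∀ y ∈ PySem.Set.ofList row, pvCnt row y ≤ (pvBest row).2) := by
  intro n
  induction n with
  | zero => intro row hlen hne; cases row <;> simp_all
  | succ n ih =>
    intro row hlen hne
    obtain ⟨h, t, rfl⟩ := List.exists_cons_of_ne_nil hne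
    have hfc : (h :: t).filter (fun x => x != h) = t.filter (fun x => x != h) := by
      simp
    have hunf : pvBest (h :: t) =
        (if t.filter (fun x => x != h) = []
         then (h, (((h :: t).length : Nat) : Int) - (((t.filter (fun x => x != h)).length : Nat) : Int))
         else if (pvBest (t.filter (fun x => x != h))).2 >
             (((h :: t).length : Nat) : Int) - (((t.filter (fun x => x != h)).length : Nat) : Int)
           then pvBest (t.filter (fun x => x != h))
           else (h, (((h :: t).length : Nat) : Int) - (((t.filter (fun x => x != h)).length : Nat) : Int))) := by
      rw [pvBest]
      simp only [hfc]
    have hcnt_eq : (((h :: t).length : Nat) : Int) - (((t.filter (fun x => x != h)).length : Nat) : Int)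
        = pvCnt (h :: t) h := by
      have hsplit := List.length_eq_length_filter_add (l := h :: t) (f := fun x => x == h)
      have hnot : (h :: t).filter (fun x => !(x == h)) = t.filter (fun x => x != h) := by
        rw [← hfc]
        refine List.filter_congr fun x _ => ?_
        simp [bne]
      rw [hnot] at hsplit
      have hcount : PySem.List.count (h :: t) h = ((h :: t).filter (fun x => x == h)).length := by
        simp [PySem.List.count_eq, List.count, List.countP_eq_length_filter]
      simp only [pvCnt, hcount]
      omega
    have hof : PySem.Set.ofList (h :: t)
        = h :: PySem.Set.ofList (t.filter (fun x => x != h)) := by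
      rw [pv_ofList_cons, pv_ofList_filter]
    have hmem_ne : ∀ y ∈ PySem.Set.ofList (t.filter (fun x => x != h)), y ≠ h := by
      intro y hy
      have hmem : y ∈ t.filter (fun x => x != h) :=
        (PySem.Set.mem_ofList _ y).mp hy
      have := List.of_mem_filter hmem
      simpa using this
    have hcnt_rest : ∀ y, y ≠ h → pvCnt (t.filter (fun x => x != h)) y = pvCnt (h :: t) y := by
      intro y hy
      simp only [pvCnt, PySem.List.count_eq]
      rw [← hfc, pv_count_filter_ne h _ y hy]
    by_cases hre : t.filter (fun x => x != h) = []
    · -- every element of the row equals h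
      have hb : pvBest (h :: t)
          = (h, (((h :: t).length : Nat) : Int) - (((t.filter (fun x => x != h)).length : Nat) : Int)) := by
        rw [hunf, if_pos hre]
      refine ⟨[], PySem.Set.ofList (t.filter (fun x => x != h)), ?_, ?_, by simp, ?_⟩
      · rw [hof, hb]; rfl
      · rw [hb, hcnt_eq]
      · intro y hy
        rw [hof] at hy
        rw [hb]
        rcases List.mem_cons.mp hy with rfl | hy'
        · simp only
          omega
        · rw [hre] at hy'
          exact absurd hy' (by simp [PySem.Set.ofList, PySem.Set.empty])
    · -- recurse on the remainder
      have hrlen : (t.filter (fun x => x != h)).length ≤ n := by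
        have := List.length_filter_le (fun x => x != h) t
        simp only [List.length_cons] at hlen
        omega
      obtain ⟨s1, s2, hsplit, hval, hlt, hle⟩ := ih (t.filter (fun x => x != h)) hrlen hre
      have hrne : (pvBest (t.filter (fun x => x != h))).1 ≠ h := by
        apply hmem_ne
        rw [hsplit]; simp
      have hrcnt : (pvBest (t.filter (fun x => x != h))).2
          = pvCnt (h :: t) (pvBest (t.filter (fun x => x != h))).1 := by
        rw [hval, hcnt_rest _ hrne]
      by_cases hgt : (pvBest (t.filter (fun x => x != h))).2 >
          (((h :: t).length : Nat) : Int) - (((t.filter (fun x => x != h)).length : Nat) : Int)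
      · have hb : pvBest (h :: t) = pvBest (t.filter (fun x => x != h)) := by
          rw [hunf, if_neg hre, if_pos hgt]
        refine ⟨h :: s1, s2, ?_, ?_, ?_, ?_⟩
        · rw [hof, hsplit, hb]; rfl
        · rw [hb, hrcnt]
        · intro y hy
          rw [hb]
          rcases List.mem_cons.mp hy with rfl | hy'
          · rw [← hcnt_eq]; omega
          · have h1 := hlt y hy'
            have hyne : y ≠ h := hmem_ne y (by rw [hsplit]; simp [hy'])
            rw [← hcnt_rest y hyne]; omega
        · intro y hy
          rw [hb]
          rw [hof] at hy
          rcases List.mem_cons.mp hy with rfl | hy'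
          · rw [← hcnt_eq]; omega
          · have h1 := hle y hy'
            have hyne : y ≠ h := hmem_ne y hy'
            rw [← hcnt_rest y hyne]; omega
      · have hb : pvBest (h :: t)
            = (h, (((h :: t).length : Nat) : Int) - (((t.filter (fun x => x != h)).length : Nat) : Int)) := by
          rw [hunf, if_neg hre, if_neg hgt]
        refine ⟨[], PySem.Set.ofList (t.filter (fun x => x != h)), ?_, ?_, by simp, ?_⟩
        · rw [hof, hb]; rfl
        · rw [hb, hcnt_eq]
        · intro y hy
          rw [hof] at hy
          rw [hb]
          rcases List.mem_cons.mp hy with rfl | hy'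
          · simp only
            omega
          · have h1 := hle y hy'
            have hyne : y ≠ h := hmem_ne y hy'
            have h2 := hcnt_rest y hyne
            simp only
            omega

theorem pv_altRow (row : List Int) (hne : row ≠ []) : (pvBest row).1 = pvRowB row := by
  obtain ⟨s1, s2, hsplit, _, hlt, hle⟩ := pv_best_spec row.length row le_rfl hne
  have hmax : PySem.List.max? (PySem.Set.ofList row) (pvCnt row) = some (pvBest row).1 := by
    rw [hsplit]
    refine pv_max?_of_split s1 s2 _ (fun y hy => ?_) (fun y hy => ?_)
    · have h1 := hlt y hy
      have h2 : pvCnt row (pvBest row).1 = (pvBest row).2 := by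
        obtain ⟨_, _, _, hval, _, _⟩ := pv_best_spec row.length row le_rfl hne
        omega
      omega
    · have h1 := hle y (by rw [hsplit]; exact hy)
      have h2 : pvCnt row (pvBest row).1 = (pvBest row).2 := by
        obtain ⟨_, _, _, hval, _, _⟩ := pv_best_spec row.length row le_rfl hne
        omega
      omega
  simp [pvRowB, hmax]

-- ===== VERDICT (by name: the statement is the Claim_ definition above) =====
theorem split_neighbours_spec : Claim_equal_split_neighbours := by
  intro pred _ hpre
  unfold Spec_split_neighbours split_neighbours split_neighbours_alt
  rw [pv_outer pred [] 0 hpre]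
  simp only [List.nil_append]
  apply List.map_congr_left
  intro row hrow
  rw [pv_altRow row (hpre row hrow)]
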